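-- pv_equiv track=rewrite | github.com/Mooliner/RepoXifratge | 22.09/ex3/ex3.py | decrypt_preserve
-- ===== SOURCE A (Python) =====
-- def decrypt_preserve(text, key):
--     res = []
--     klen = len(key)
--     ki = 0
--     for ch in text:
--         if ch.isalpha():
--             k = ord(key[ki % klen].lower()) - 97
--             base = ord('A') if ch.isupper() else ord('a')
--             res.append(chr((ord(ch) - base - k) % 26 + base))
--             ki += 1
--         else:
--             res.append(ch)
--     return ''.join(res)
-- ===== SOURCE B (Python) =====
-- def decrypt_preserve(text, key):
--     letters = [ch for ch in text if ch.isalpha()]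
--     klen = len(key)
--     dec = []
--     for i, ch in enumerate(letters):
--         k = ord(key[i % klen].lower()) - 97
--         base = ord('A') if ch.isupper() else ord('a')
--         dec.append(chr((ord(ch) - base - k) % 26 + base))
--     it = iter(dec)
--     return ''.join(next(it) if ch.isalpha() else ch for ch in text)
-- ===== Notes on version B (the rewrite author's own statement) =====
-- stated objective: alternative
-- what changed: B splits the work into two passes: it first extracts the letter stream and decrypts it into a separate buffer indexed by the letter position, then merges the decrypted letters back into the original text with an iterator, instead of A's single loop threading a key-index counter through mixed characters.
import Mathlib
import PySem

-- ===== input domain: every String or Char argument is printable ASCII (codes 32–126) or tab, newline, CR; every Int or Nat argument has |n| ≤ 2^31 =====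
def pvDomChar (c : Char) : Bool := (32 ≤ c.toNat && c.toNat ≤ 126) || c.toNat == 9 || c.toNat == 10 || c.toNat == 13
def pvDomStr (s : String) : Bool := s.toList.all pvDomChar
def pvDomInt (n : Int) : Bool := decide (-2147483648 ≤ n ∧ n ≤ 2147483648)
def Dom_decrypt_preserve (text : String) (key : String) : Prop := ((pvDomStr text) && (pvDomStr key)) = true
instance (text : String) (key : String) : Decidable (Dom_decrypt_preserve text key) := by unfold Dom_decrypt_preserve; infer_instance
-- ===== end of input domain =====

-- B decrypts the extracted letter stream in a separate pass and then merges it back over the text (alternative decomposition, same cost); A is a single loop threading a key counter.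


-- ===== PORT A =====
-- literal transliteration of A: one loop over the text, state = (res, ki)
def decrypt_preserve (text : String) (key : String) : String :=
  let klen : Int := key.length
  let st := text.toList.foldl (fun (st : List Char × Int) ch =>
    if PySem.Chars.isalpha ch then
      -- key[ki % klen].lower(); the .getD 'a' only totalizes the out-of-range case (unreachable when klen > 0)
      let kc := (PySem.Str.pyGet? key (PySem.Int.mod st.2 klen)).getD 'a'
      let k : Int := (PySem.Chars.lowerChar kc).toNat - 97
      let base : Int := if PySem.Chars.isupper ch then 65 else 97
      (st.1 ++ [Char.ofNat (PySem.Int.mod ((ch.toNat : Int) - base - k) 26 + base).toNat], st.2 + 1)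
    else
      (st.1 ++ [ch], st.2)) ([], 0)
  String.mk st.1

-- ===== PORT B =====
-- decrypt one letter given its position i in the letter stream (exact ASCII lower via PySem.Chars.lowerChar)
def pvDecChar (key : String) (klen : Int) (i : Int) (ch : Char) : Char :=
  let kc := (PySem.Str.pyGet? key (PySem.Int.mod i klen)).getD 'a'
  let k : Int := (PySem.Chars.lowerChar kc).toNat - 97
  let base : Int := if PySem.Chars.isupper ch then 65 else 97
  Char.ofNat (PySem.Int.mod ((ch.toNat : Int) - base - k) 26 + base).toNat

-- ''.join(next(it) if ch.isalpha() else ch for ch in text); headD/tail only totalize (dec never runs out)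
def pvMerge (text : List Char) (dec : List Char) : List Char :=
  match text with
  | [] => []
  | ch :: t =>
    if PySem.Chars.isalpha ch then dec.headD ch :: pvMerge t dec.tail
    else ch :: pvMerge t dec

def decrypt_preserve_alt (text : String) (key : String) : String :=
  let letters := text.toList.filter PySem.Chars.isalpha
  let klen : Int := key.length
  let dec := (PySem.List.enumerate letters 0).map (fun p => pvDecChar key klen p.1 p.2)
  String.mk (pvMerge text.toList dec)

-- ===== PRECONDITION & SPEC =====
-- Pre_ excludes exactly the inputs where Python A raises ZeroDivisionError: an empty key together with at least one alphabetic character in text.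
def Pre_decrypt_preserve (text : String) (key : String) : Prop :=
  (text.toList.any PySem.Chars.isalpha) = true → key ≠ ""
instance (text : String) (key : String) : Decidable (Pre_decrypt_preserve text key) := by unfold Pre_decrypt_preserve; infer_instance

def pvWitness_decrypt_preserve : String × String := ("Hello, World!", "LeMoN")

def Spec_decrypt_preserve (text : String) (key : String) (out : String) : Prop := out = decrypt_preserve_alt text key
instance (text : String) (key : String) (out : String) : Decidable (Spec_decrypt_preserve text key out) := by unfold Spec_decrypt_preserve; infer_instance

-- ===== CLAIM (what is proved, stated in full; the proofs are below) =====
def Claim_equal_decrypt_preserve : Prop := ∀ (text : String) (key : String), Dom_decrypt_preserve text key → Pre_decrypt_preserve text key → Spec_decrypt_preserve text key (decrypt_preserve text key)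

-- ===== LEMMAS AND PROOFS =====

-- common recursive description of the decrypted output
def pvGo (key : String) (klen : Int) : List Char → Int → List Char
  | [], _ => []
  | ch :: t, ki =>
    if PySem.Chars.isalpha ch then pvDecChar key klen ki ch :: pvGo key klen t (ki + 1)
    else ch :: pvGo key klen t ki

theorem pvFoldA (key : String) (klen : Int) :
    ∀ (l : List Char) (acc : List Char) (ki : Int),
      (l.foldl (fun (st : List Char × Int) ch =>
        if PySem.Chars.isalpha ch then
          let kc := (PySem.Str.pyGet? key (PySem.Int.mod st.2 klen)).getD 'a'
          let k : Int := (PySem.Chars.lowerChar kc).toNat - 97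
          let base : Int := if PySem.Chars.isupper ch then 65 else 97
          (st.1 ++ [Char.ofNat (PySem.Int.mod ((ch.toNat : Int) - base - k) 26 + base).toNat], st.2 + 1)
        else (st.1 ++ [ch], st.2)) (acc, ki)).1 = acc ++ pvGo key klen l ki := by
  intro l
  induction l with
  | nil => intro acc ki; simp [pvGo]
  | cons ch t ih =>
    intro acc ki
    by_cases h : PySem.Chars.isalpha ch = true
    · simp only [List.foldl_cons, h, if_pos, pvGo, ih, pvDecChar]
      simp
    · simp only [List.foldl_cons, pvGo, h, if_neg, Bool.false_eq_true, not_false_iff, ih]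
      simp

theorem pvMergeGo (key : String) (klen : Int) :
    ∀ (l : List Char) (ki : Int),
      pvMerge l ((PySem.List.enumerate (l.filter PySem.Chars.isalpha) ki).map
        (fun p => pvDecChar key klen p.1 p.2)) = pvGo key klen l ki := by
  intro l
  induction l with
  | nil => intro ki; simp [pvMerge, pvGo]
  | cons ch t ih =>
    intro ki
    by_cases h : PySem.Chars.isalpha ch = true
    · simp only [List.filter_cons, h, if_pos, PySem.List.enumerate_cons, List.map_cons,
        pvMerge, pvGo, List.headD, List.tail]
      simp [ih]
    · simp only [List.filter_cons, h, Bool.false_eq_true, if_neg, not_false_iff, pvMerge, pvGo]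
      simp [ih]

-- ===== VERDICT (by name: the statement is the Claim_ definition above) =====
theorem decrypt_preserve_spec : Claim_equal_decrypt_preserve := by
  intro text key _ _
  unfold Spec_decrypt_preserve decrypt_preserve decrypt_preserve_alt
  simp only [pvFoldA key (key.length : Int) text.toList [] 0, List.nil_append,
    pvMergeGo key (key.length : Int) text.toList 0]
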